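-- pv_equiv track=rewrite | github.com/psi-oss/get-physics-done | src/gpd/adapters/install_utils.py | _split_leading_model_visible_sections
-- ===== SOURCE A (Python) =====
-- def _leading_top_level_section_end(text: str) -> int:
--     """Return the character offset that ends the first top-level section in *text*."""
--
--     lines = text.splitlines(keepends=True)
--     if not lines:
--         return 0
--
--     in_fence = False
--     offset = len(text)
--     for index, line in enumerate(lines[1:], start=1):
--         stripped = line.lstrip()
--         if stripped.startswith("```") or stripped.startswith("~~~"):
--             in_fence = not in_fence
--             continue
--         if in_fence:
--             continue
--         if line.startswith("## "):
--             offset = sum(len(entry) for entry in lines[:index])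
--             break
--     return offset
--
-- def _split_leading_model_visible_sections(body: str) -> tuple[str, str]:
--     """Return leading command-visibility sections and the remaining markdown body."""
--
--     working = body.lstrip("\r\n")
--     prefixes: list[str] = []
--     allowed_headings = ("Agent Requirements", "Command Requirements", "Review Contract")
--
--     while True:
--         heading = next((candidate for candidate in allowed_headings if working.startswith(f"## {candidate}")), None)
--         if heading is None:
--             break
--         section_end = _leading_top_level_section_end(working)
--         prefixes.append(working[:section_end].rstrip("\r\n"))
--         working = working[section_end:].lstrip("\r\n")
--
--     return "\n\n".join(prefixes), working
-- ===== SOURCE B (Python) =====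
-- def _split_leading_model_visible_sections(body: str) -> tuple[str, str]:
--     """One-pass variant: split the body into fence-aware top-level sections once,
--     then take allowed-heading sections off the front."""
--
--     working = body.lstrip("\r\n")
--     lines = working.splitlines(keepends=True)
--
--     # Single fence-aware pass cutting the text into top-level sections (lists of lines).
--     if not lines:
--         sections = [[]]
--     else:
--         sections = []
--         cur = [lines[0]]
--         in_fence = False
--         for line in lines[1:]:
--             stripped = line.lstrip()
--             if stripped.startswith("```") or stripped.startswith("~~~"):
--                 in_fence = not in_fence
--             elif not in_fence and line.startswith("## "):
--                 sections.append(cur)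
--                 cur = []
--             cur.append(line)
--         sections.append(cur)
--
--     allowed = ("## Agent Requirements", "## Command Requirements", "## Review Contract")
--     prefixes = []
--     rest = ""
--     idx = 0
--     while idx < len(sections):
--         text = "".join(sections[idx])
--         if text.startswith(allowed):
--             prefixes.append(text.rstrip("\r\n"))
--             idx += 1
--         else:
--             rest = "".join("".join(sec) for sec in sections[idx:])
--             break
--     return "\n\n".join(prefixes), rest
-- ===== Notes on version B (the rewrite author's own statement) =====
-- stated objective: alternative
-- what changed: A repeatedly rescans the shrinking remainder (fence-aware _leading_top_level_section_end per peeled section, with a quadratic sum(len) per hit); B splits the body once into fence-aware top-level sections in a single pass over the lines and then just pops allowed-heading sections off the front.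
import Mathlib
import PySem

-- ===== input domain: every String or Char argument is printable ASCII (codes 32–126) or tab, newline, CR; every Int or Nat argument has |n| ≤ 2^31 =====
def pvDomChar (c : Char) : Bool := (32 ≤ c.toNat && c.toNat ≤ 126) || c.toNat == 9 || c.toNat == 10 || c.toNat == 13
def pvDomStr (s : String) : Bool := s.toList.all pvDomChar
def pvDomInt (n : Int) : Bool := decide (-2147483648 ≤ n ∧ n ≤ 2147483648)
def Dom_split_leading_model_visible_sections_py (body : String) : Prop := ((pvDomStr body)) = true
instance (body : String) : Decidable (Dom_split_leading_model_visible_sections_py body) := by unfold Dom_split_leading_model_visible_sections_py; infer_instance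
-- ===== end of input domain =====

-- B replaces A's repeated fence-aware rescans of the shrinking remainder by ONE fence-aware pass
-- that cuts the text into top-level sections, then takes allowed sections off the front (objective:
-- alternative decomposition).

-- ===== PORT A =====
-- Character-class helpers, exact for Python string methods on the Dom alphabet
-- (among chars 32..126, tab, LF, CR the only whitespace is ' ','\t','\n','\r'
-- and the only line breaks are "\n", "\r", "\r\n").
def pvIsBreak (c : Char) : Bool := c == '\n' || c == '\r'
def pvIsWS (c : Char) : Bool := c == ' ' || c == '\t' || c == '\n' || c == '\r'
-- s.lstrip("\r\n")
def pvLstripRN (l : List Char) : List Char := l.dropWhile pvIsBreak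
-- s.rstrip("\r\n")
def pvRstripRN (l : List Char) : List Char := (l.reverse.dropWhile pvIsBreak).reverse
-- s.lstrip()
def pvLstripWS (l : List Char) : List Char := l.dropWhile pvIsWS

-- s.splitlines(keepends=True), hand-ported (exact on Dom chars: breaks are "\n", "\r\n", "\r")
def pvSplitLinesK : List Char → List (List Char)
  | [] => []
  | '\r' :: '\n' :: r => ['\r', '\n'] :: pvSplitLinesK r
  | '\n' :: r => ['\n'] :: pvSplitLinesK r
  | '\r' :: r => ['\r'] :: pvSplitLinesK r
  | c :: r =>
    match pvSplitLinesK r with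
    | [] => [[c]]
    | l :: ls => (c :: l) :: ls

-- sum(len(entry) for entry in ls)
def pvSumLens (ls : List (List Char)) : Nat := (ls.map List.length).sum

-- stripped.startswith("```") or stripped.startswith("~~~")
def pvFenceLine (l : List Char) : Bool :=
  List.isPrefixOf ['`','`','`'] (pvLstripWS l) || List.isPrefixOf ['~','~','~'] (pvLstripWS l)

-- line.startswith("## ")
def pvHeads (l : List Char) : Bool := List.isPrefixOf ['#','#',' '] l

-- the for-loop of _leading_top_level_section_end (index/fence state, break by returning)
def pvLeadGo (all : List (List Char)) (total : Nat) : List (List Char) → Nat → Bool → Nat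
  | [], _, _ => total
  | l :: rest, index, fence =>
    if pvFenceLine l then pvLeadGo all total rest (index + 1) (!fence)
    else if fence then pvLeadGo all total rest (index + 1) fence
    else if pvHeads l then pvSumLens (all.take index)
    else pvLeadGo all total rest (index + 1) fence

-- _leading_top_level_section_end
def pvLeadingEnd (text : List Char) : Nat :=
  match pvSplitLinesK text with
  | [] => 0
  | l0 :: rest => pvLeadGo (l0 :: rest) text.length rest 1 false

-- the allowed headings, prefixed by "## " as A's f-string does
def pvPats : List (List Char) :=
  [("## Agent Requirements").toList, ("## Command Requirements").toList, ("## Review Contract").toList]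

-- lemmas the port needs for termination (cited by pvALoop's decreasing_by)
theorem pvSL_rn (r : List Char) : pvSplitLinesK ('\r' :: '\n' :: r) = ['\r', '\n'] :: pvSplitLinesK r := by
  simp [pvSplitLinesK]

theorem pvSL_n (r : List Char) : pvSplitLinesK ('\n' :: r) = ['\n'] :: pvSplitLinesK r := by
  simp [pvSplitLinesK]

theorem pvSL_r (r : List Char) (h : r.head? ≠ some '\n') :
    pvSplitLinesK ('\r' :: r) = ['\r'] :: pvSplitLinesK r := by
  cases r with
  | nil => simp [pvSplitLinesK]
  | cons a t =>
    rw [pvSplitLinesK.eq_def]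
    split <;> simp_all
    rename_i heq
    rcases heq with ⟨h3, h4⟩
    simp_all [← h3]

theorem pvSL_c (c : Char) (r : List Char) (h1 : c ≠ '\n') (h2 : c ≠ '\r') :
    pvSplitLinesK (c :: r)
      = match pvSplitLinesK r with | [] => [[c]] | l :: ls => (c :: l) :: ls := by
  rw [pvSplitLinesK.eq_def]
  split <;> simp_all

theorem pvSplitLinesK_nil : ∀ (w : List Char), pvSplitLinesK w = [] → w = [] := by
  intro w
  induction w using pvSplitLinesK.induct with
  | case1 => intro _; rfl
  | case2 r ih => rw [pvSL_rn]; intro h; simp at h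
  | case3 r ih => rw [pvSL_n]; intro h; simp at h
  | case4 r hne ih =>
    rw [pvSL_r r (by cases r <;> simp_all)]
    intro h; simp at h
  | case5 c r h1 h2 h3 hr ih =>
    rw [pvSL_c c r h2 h3, hr]
    intro h; simp at h
  | case6 c r h1 h2 h3 l ls hr ih =>
    rw [pvSL_c c r h2 h3, hr]
    intro h; simp at h

theorem pvSplitLinesK_mem_ne : ∀ (w : List Char) (l : List Char), l ∈ pvSplitLinesK w → l ≠ [] := by
  intro w
  induction w using pvSplitLinesK.induct with
  | case1 => intro l h; simp [pvSplitLinesK] at h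
  | case2 r ih =>
    rw [pvSL_rn]; intro l h
    rcases List.mem_cons.1 h with h | h
    · subst h; simp
    · exact ih l h
  | case3 r ih =>
    rw [pvSL_n]; intro l h
    rcases List.mem_cons.1 h with h | h
    · subst h; simp
    · exact ih l h
  | case4 r hne ih =>
    rw [pvSL_r r (by cases r <;> simp_all)]; intro l h
    rcases List.mem_cons.1 h with h | h
    · subst h; simp
    · exact ih l h
  | case5 c r h1 h2 h3 hr ih =>
    rw [pvSL_c c r h2 h3, hr]; intro l h
    simp at h
    simp [h]
  | case6 c r h1 h2 h3 l0 ls hr ih =>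
    rw [pvSL_c c r h2 h3, hr]; intro l h
    rcases List.mem_cons.1 h with h | h
    · subst h; simp
    · exact ih l (by rw [hr]; exact List.mem_cons_of_mem _ h)

theorem pvLeadGo_ge_one (all : List (List Char)) (total : Nat)
    (h0 : 1 ≤ total) (h1 : ∀ j, 1 ≤ j → 1 ≤ pvSumLens (all.take j)) :
    ∀ (t : List (List Char)) (i : Nat) (f : Bool), 1 ≤ i → 1 ≤ pvLeadGo all total t i f := by
  intro t
  induction t with
  | nil => intro i f _; simpa [pvLeadGo] using h0
  | cons l rest ih =>
    intro i f hi
    rw [pvLeadGo]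
    split_ifs with hf hfc hh
    · exact ih (i + 1) (!f) (by omega)
    · exact ih (i + 1) f (by omega)
    · exact h1 i hi
    · exact ih (i + 1) f (by omega)

theorem pvLeadingEnd_pos (w : List Char) (hw : w ≠ []) : 1 ≤ pvLeadingEnd w := by
  rw [pvLeadingEnd]
  cases hs : pvSplitLinesK w with
  | nil => exact absurd (pvSplitLinesK_nil w hs) hw
  | cons l0 rest =>
    apply pvLeadGo_ge_one
    · have : w.length ≠ 0 := fun h => hw (List.eq_nil_of_length_eq_zero h)
      omega
    · intro j hj
      have hne : l0 ≠ [] := pvSplitLinesK_mem_ne w l0 (by rw [hs]; exact List.mem_cons_self)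
      have : l0.length ≠ 0 := fun h => hne (List.eq_nil_of_length_eq_zero h)
      cases j with
      | zero => omega
      | succ j' =>
        simp only [List.take_succ_cons, pvSumLens, List.map_cons, List.sum_cons]
        omega
    · exact Nat.le_refl 1

theorem pvAllowed_ne (w : List Char)
    (h : (pvPats.find? (fun p => List.isPrefixOf p w)).isSome = true) : w ≠ [] := by
  intro hw
  subst hw
  simp [pvPats, List.find?, List.isPrefixOf] at h

-- the while-loop of _split_leading_model_visible_sections
def pvALoop (w : List Char) : List (List Char) × List Char :=
  if h : (pvPats.find? (fun p => List.isPrefixOf p w)).isSome then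
    let e := pvLeadingEnd w
    let pfx := pvRstripRN (w.take e)
    let r := pvALoop (pvLstripRN (w.drop e))
    (pfx :: r.1, r.2)
  else ([], w)
termination_by w.length
decreasing_by
  have hw : w ≠ [] := pvAllowed_ne w h
  have h1 : 1 ≤ pvLeadingEnd w := pvLeadingEnd_pos w hw
  have h2 : (pvLstripRN (w.drop (pvLeadingEnd w))).length ≤ (w.drop (pvLeadingEnd w)).length :=
    List.length_dropWhile_le _ _
  have h3 : (w.drop (pvLeadingEnd w)).length = w.length - pvLeadingEnd w := List.length_drop
  have h4 : w.length ≠ 0 := fun hh => hw (List.eq_nil_of_length_eq_zero hh)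
  omega

-- _split_leading_model_visible_sections (port of A); "\n\n".join = List.intercalate
def split_leading_model_visible_sections_py (body : String) : String × String :=
  let w := pvLstripRN body.toList
  let r := pvALoop w
  (String.ofList (List.intercalate ['\n', '\n'] r.1), String.ofList r.2)

-- ===== PORT B =====
-- the body of B's single sectioning pass (state: sections so far, current section, fence flag)
def pvBStep (st : List (List (List Char)) × List (List Char) × Bool) (l : List Char) :
    List (List (List Char)) × List (List Char) × Bool :=
  if pvFenceLine l then (st.1, st.2.1 ++ [l], !st.2.2)
  else if !st.2.2 && pvHeads l then (st.1 ++ [st.2.1], [l], st.2.2)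
  else (st.1, st.2.1 ++ [l], st.2.2)

-- B's one-pass split of the line list into top-level sections
def pvBSections (lines : List (List Char)) : List (List (List Char)) :=
  match lines with
  | [] => [[]]
  | l0 :: rest =>
    let st := rest.foldl pvBStep ([], [l0], false)
    st.1 ++ [st.2.1]

-- B's front-consumption loop over the sections
def pvBConsume : List (List (List Char)) → List (List Char) × List Char
  | [] => ([], [])
  | sec :: rest =>
    let text := sec.flatten
    if pvPats.any (fun p => List.isPrefixOf p text) then
      let r := pvBConsume rest
      (pvRstripRN text :: r.1, r.2)
    else ([], ((sec :: rest).map List.flatten).flatten)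

-- _split_leading_model_visible_sections (port of B, Source B)
def split_leading_model_visible_sections_py_alt (body : String) : String × String :=
  let w := pvLstripRN body.toList
  let r := pvBConsume (pvBSections (pvSplitLinesK w))
  (String.ofList (List.intercalate ['\n', '\n'] r.1), String.ofList r.2)

-- ===== PRECONDITION & SPEC =====
def Spec_split_leading_model_visible_sections_py (body : String) (out : String × String) : Prop := out = split_leading_model_visible_sections_py_alt body
instance (body : String) (out : String × String) : Decidable (Spec_split_leading_model_visible_sections_py body out) := by unfold Spec_split_leading_model_visible_sections_py; infer_instance

-- ===== CLAIM (what is proved, stated in full; the proofs are below) =====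
def Claim_equal_split_leading_model_visible_sections_py : Prop := ∀ (body : String), Dom_split_leading_model_visible_sections_py body → Spec_split_leading_model_visible_sections_py body (split_leading_model_visible_sections_py body)

-- ===== LEMMAS AND PROOFS =====

theorem pv_find?_isSome_eq_any {α : Type} (l : List α) (p : α → Bool) :
    (l.find? p).isSome = l.any p := by
  induction l with
  | nil => rfl
  | cons a t ih => by_cases h : p a <;> simp [List.find?, List.any, h, ih]

theorem pvSplitLinesK_flatten : ∀ (w : List Char), (pvSplitLinesK w).flatten = w := by
  intro w
  induction w using pvSplitLinesK.induct with
  | case1 => rfl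
  | case2 r ih => rw [pvSL_rn]; simp [ih]
  | case3 r ih => rw [pvSL_n]; simp [ih]
  | case4 r hne ih =>
    rw [pvSL_r r (by cases r <;> simp_all)]
    simp [ih]
  | case5 c r h1 h2 h3 hr ih =>
    rw [pvSL_c c r h2 h3, hr]
    have : r = [] := by rw [← ih, hr]; rfl
    simp [this]
  | case6 c r h1 h2 h3 l ls hr ih =>
    rw [pvSL_c c r h2 h3, hr]
    rw [hr] at ih
    simpa using congrArg (c :: ·) ih

-- a valid keepends line decomposition
inductive PvLines : List (List Char) → Prop
  | nil : PvLines []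
  | last (m : List Char) : m ≠ [] → m.all (fun c => !pvIsBreak c) = true → PvLines [m]
  | cons (m ch : List Char) (rest : List (List Char)) :
      m.all (fun c => !pvIsBreak c) = true →
      (ch = ['\n'] ∨ ch = ['\r', '\n'] ∨ (ch = ['\r'] ∧ rest.flatten.head? ≠ some '\n')) →
      PvLines rest → PvLines ((m ++ ch) :: rest)

theorem PvLines_SL : ∀ (w : List Char), PvLines (pvSplitLinesK w) := by
  intro w
  induction w using pvSplitLinesK.induct with
  | case1 => exact PvLines.nil
  | case2 r ih =>
    rw [pvSL_rn]
    exact PvLines.cons [] ['\r', '\n'] _ (by simp) (Or.inr (Or.inl rfl)) ih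
  | case3 r ih =>
    rw [pvSL_n]
    exact PvLines.cons [] ['\n'] _ (by simp) (Or.inl rfl) ih
  | case4 r hne ih =>
    rw [pvSL_r r (by cases r <;> simp_all)]
    refine PvLines.cons [] ['\r'] _ (by simp) (Or.inr (Or.inr ⟨rfl, ?_⟩)) ih
    rw [pvSplitLinesK_flatten]
    cases r <;> simp_all
  | case5 c r h1 h2 h3 hr ih =>
    rw [pvSL_c c r h2 h3, hr]
    exact PvLines.last [c] (by simp) (by simp [pvIsBreak]; exact ⟨h2, h3⟩)
  | case6 c r h1 h2 h3 l ls hr ih =>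
    rw [pvSL_c c r h2 h3, hr]
    rw [hr] at ih
    have hcb : pvIsBreak c = false := by simp [pvIsBreak]; exact ⟨h2, h3⟩
    cases ih with
    | last _m hne hall =>
      refine PvLines.last (c :: l) (by simp) ?_
      simp only [List.all_cons, Bool.and_eq_true]
      exact ⟨by simp [hcb], hall⟩
    | cons m ch _rest hall hch hrest =>
      refine PvLines.cons (c :: m) ch ls ?_ hch hrest
      simp only [List.all_cons, Bool.and_eq_true]
      exact ⟨by simp [hcb], hall⟩

theorem PvLines_tail : ∀ (l : List Char) (ls : List (List Char)), PvLines (l :: ls) → PvLines ls := by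
  intro l ls h
  cases h with
  | last m h1 h2 => exact PvLines.nil
  | cons m ch rest h1 h2 h3 => exact h3

theorem PvLines_suffix : ∀ (u v : List (List Char)), PvLines (u ++ v) → PvLines v := by
  intro u
  induction u with
  | nil => intro v h; exact h
  | cons l t ih => intro v h; exact ih v (PvLines_tail _ _ h)

theorem PvLines_mem_ne : ∀ (ls : List (List Char)), PvLines ls → ∀ l ∈ ls, l ≠ [] := by
  intro ls h
  induction h with
  | nil => intro l hl; simp at hl
  | last m h1 h2 => intro l hl; simp at hl; subst hl; exact h1
  | cons m ch rest h1 h2 h3 ih =>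
    intro l hl
    rcases List.mem_cons.1 hl with h | h
    · subst h
      rcases h2 with h2 | h2 | ⟨h2, -⟩ <;> simp [h2]
    · exact ih l h

theorem pvSL_breakless : ∀ (m : List Char), m.all (fun c => !pvIsBreak c) = true → m ≠ [] →
    pvSplitLinesK m = [m] := by
  intro m
  induction m with
  | nil => intro _ h; exact absurd rfl h
  | cons c m' ih =>
    intro hall _
    simp only [List.all_cons, Bool.and_eq_true] at hall
    have hcb : pvIsBreak c = false := by simpa using hall.1
    have hc1 : c ≠ '\n' := by intro h; simp [h, pvIsBreak] at hcb
    have hc2 : c ≠ '\r' := by intro h; simp [h, pvIsBreak] at hcb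
    rw [pvSL_c c m' hc1 hc2]
    cases hm : m' with
    | nil => simp [pvSplitLinesK]
    | cons a t => rw [← hm, ih hall.2 (by simp [hm])]

theorem pvSL_nb_prepend : ∀ (m : List Char), m.all (fun c => !pvIsBreak c) = true →
    ∀ (u l : List Char) (ls : List (List Char)), pvSplitLinesK u = l :: ls →
    pvSplitLinesK (m ++ u) = (m ++ l) :: ls := by
  intro m
  induction m with
  | nil => intro _ u l ls h; simpa using h
  | cons c m' ih =>
    intro hall u l ls h
    simp only [List.all_cons, Bool.and_eq_true] at hall
    have hcb : pvIsBreak c = false := by simpa using hall.1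
    have hc1 : c ≠ '\n' := by intro hx; simp [hx, pvIsBreak] at hcb
    have hc2 : c ≠ '\r' := by intro hx; simp [hx, pvIsBreak] at hcb
    show pvSplitLinesK (c :: (m' ++ u)) = _
    rw [pvSL_c c (m' ++ u) hc1 hc2, ih hall.2 u l ls h]
    simp

theorem pvSL_term : ∀ (ch v : List Char),
    (ch = ['\n'] ∨ ch = ['\r', '\n'] ∨ (ch = ['\r'] ∧ v.head? ≠ some '\n')) →
    pvSplitLinesK (ch ++ v) = ch :: pvSplitLinesK v := by
  intro ch v hch
  rcases hch with h | h | ⟨h, hv⟩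
  · subst h; exact pvSL_n v
  · subst h; exact pvSL_rn v
  · subst h; exact pvSL_r v hv

theorem PvLines_reconstruct : ∀ (ls : List (List Char)), PvLines ls →
    pvSplitLinesK ls.flatten = ls := by
  intro ls h
  induction h with
  | nil => rfl
  | last m h1 h2 => simpa using pvSL_breakless m h2 h1
  | cons m ch rest h1 h2 h3 ih =>
    have hterm : pvSplitLinesK (ch ++ rest.flatten) = ch :: rest := by
      rw [pvSL_term ch rest.flatten h2, ih]
    have := pvSL_nb_prepend m h1 (ch ++ rest.flatten) ch rest hterm
    simpa using this

-- structural counterpart of B's sectioning pass: (rest of current section, later sections)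
def pvSecGo : List (List Char) → Bool → List (List Char) × List (List (List Char))
  | [], _ => ([], [])
  | l :: ls, f =>
    if pvFenceLine l then
      let r := pvSecGo ls (!f)
      (l :: r.1, r.2)
    else if !f && pvHeads l then
      let r := pvSecGo ls f
      ([], (l :: r.1) :: r.2)
    else
      let r := pvSecGo ls f
      (l :: r.1, r.2)

def pvSecTop (ls : List (List Char)) : List (List (List Char)) :=
  match ls with
  | [] => [[]]
  | l0 :: t => (l0 :: (pvSecGo t false).1) :: (pvSecGo t false).2

theorem pvFold_secGo : ∀ (ls : List (List Char)) (secs : List (List (List Char)))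
    (cur : List (List Char)) (f : Bool),
    (ls.foldl pvBStep (secs, cur, f)).1 ++ [(ls.foldl pvBStep (secs, cur, f)).2.1]
      = secs ++ (cur ++ (pvSecGo ls f).1) :: (pvSecGo ls f).2 := by
  intro ls
  induction ls with
  | nil => intro secs cur f; simp [pvSecGo]
  | cons l ls ih =>
    intro secs cur f
    simp only [List.foldl_cons]
    by_cases h1 : pvFenceLine l
    · rw [show pvBStep (secs, cur, f) l = (secs, cur ++ [l], !f) from by simp [pvBStep, h1]]
      rw [ih]
      simp [pvSecGo, h1]
    · by_cases h2 : (!f && pvHeads l) = true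
      · rw [show pvBStep (secs, cur, f) l = (secs ++ [cur], [l], f) from by
          simp [pvBStep, h1, h2]]
        rw [ih]
        have hf : f = false := by revert h2; cases f <;> simp
        subst hf
        simp only [pvSecGo, if_neg h1, if_pos h2]
        simp
      · rw [show pvBStep (secs, cur, f) l = (secs, cur ++ [l], f) from by
          simp only [pvBStep, if_neg h1, if_neg h2]]
        rw [ih]
        simp only [pvSecGo, if_neg h1, if_neg h2]
        simp

theorem pvBSections_eq_secTop (ls : List (List Char)) : pvBSections ls = pvSecTop ls := by
  cases ls with
  | nil => rfl
  | cons l0 t =>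
    show (t.foldl pvBStep ([], [l0], false)).1 ++ [(t.foldl pvBStep ([], [l0], false)).2.1] = _
    rw [pvFold_secGo]
    simp [pvSecTop]

theorem pvSecGo_flat : ∀ (ls : List (List Char)) (f : Bool),
    (pvSecGo ls f).1 ++ ((pvSecGo ls f).2).flatten = ls := by
  intro ls
  induction ls with
  | nil => intro f; simp [pvSecGo]
  | cons l ls ih =>
    intro f
    by_cases h1 : pvFenceLine l
    · simp only [pvSecGo, if_pos h1]
      simpa using ih (!f)
    · by_cases h2 : (!f && pvHeads l) = true
      · simp only [pvSecGo, if_neg h1, if_pos h2]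
        simpa using ih f
      · simp only [pvSecGo, if_neg h1, if_neg h2]
        simpa using ih f

theorem pvSecGo_heads : ∀ (ls : List (List Char)) (f : Bool) (s : List (List Char)),
    s ∈ (pvSecGo ls f).2 → ∃ l t, s = l :: t ∧ pvHeads l = true := by
  intro ls
  induction ls with
  | nil => intro f s h; simp [pvSecGo] at h
  | cons l ls ih =>
    intro f s h
    by_cases h1 : pvFenceLine l
    · simp only [pvSecGo, if_pos h1] at h
      exact ih (!f) s h
    · by_cases h2 : (!f && pvHeads l) = true
      · simp only [pvSecGo, if_neg h1, if_pos h2] at h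
        rcases List.mem_cons.1 h with h | h
        · refine ⟨l, (pvSecGo ls f).1, h, ?_⟩
          rw [Bool.and_eq_true] at h2
          exact h2.2
        · exact ih f s h
      · simp only [pvSecGo, if_neg h1, if_neg h2] at h
        exact ih f s h

theorem pvSecGo_shift : ∀ (ls : List (List Char)) (f : Bool) (l1 : List Char)
    (c1 : List (List Char)) (ss : List (List (List Char))),
    (pvSecGo ls f).2 = (l1 :: c1) :: ss → pvSecGo (c1 ++ ss.flatten) false = (c1, ss) := by
  intro ls
  induction ls with
  | nil => intro f l1 c1 ss h; simp [pvSecGo] at h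
  | cons l ls ih =>
    intro f l1 c1 ss h
    by_cases h1 : pvFenceLine l
    · simp only [pvSecGo, if_pos h1] at h
      exact ih (!f) l1 c1 ss h
    · by_cases h2 : (!f && pvHeads l) = true
      · have hf : f = false := by revert h2; cases f <;> simp
        subst hf
        simp only [pvSecGo, if_neg h1, if_pos h2] at h
        obtain ⟨hhead, htail⟩ := List.cons.inj h
        obtain ⟨-, hc1⟩ := List.cons.inj hhead
        rw [← hc1, ← htail, pvSecGo_flat ls false]
      · simp only [pvSecGo, if_neg h1, if_neg h2] at h
        exact ih f l1 c1 ss h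

theorem pvLeadGo_spec : ∀ (t : List (List Char)) (f : Bool) (pre : List (List Char)) (total : Nat),
    pvLeadGo (pre ++ t) total t pre.length f
      = if (pvSecGo t f).2.isEmpty then total else pvSumLens pre + pvSumLens (pvSecGo t f).1 := by
  intro t
  induction t with
  | nil => intro f pre total; simp [pvLeadGo, pvSecGo]
  | cons l ls ih =>
    intro f pre total
    rw [pvLeadGo]
    by_cases h1 : pvFenceLine l
    · rw [if_pos h1]
      have := ih (!f) (pre ++ [l]) total
      simp only [List.append_assoc, List.singleton_append, List.length_append,
        List.length_cons, List.length_nil] at this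
      rw [show pre.length + 1 = pre.length + (0 + 1) from by omega] at this
      rw [this]
      simp only [pvSecGo, if_pos h1]
      by_cases he : (pvSecGo ls (!f)).2.isEmpty <;> simp [he, pvSumLens, Nat.add_assoc, Nat.add_comm, Nat.add_left_comm]
    · rw [if_neg h1]
      by_cases hf : f
      · rw [if_pos hf]
        have h2 : ¬((!f && pvHeads l) = true) := by simp [hf]
        have := ih f (pre ++ [l]) total
        simp only [List.append_assoc, List.singleton_append, List.length_append,
          List.length_cons, List.length_nil] at this
        rw [show pre.length + 1 = pre.length + (0 + 1) from by omega] at this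
        rw [this]
        simp only [pvSecGo, if_neg h1, if_neg h2]
        by_cases he : (pvSecGo ls f).2.isEmpty <;> simp [he, pvSumLens, Nat.add_assoc, Nat.add_comm, Nat.add_left_comm]
      · rw [if_neg hf]
        have hf' : f = false := by cases f with | false => rfl | true => exact absurd rfl hf
        subst hf'
        by_cases hh : pvHeads l
        · rw [if_pos hh]
          have h2 : (!false && pvHeads l) = true := by simp [hh]
          simp only [pvSecGo, if_neg h1, if_pos h2]
          rw [List.take_left]
          simp [pvSumLens]
        · rw [if_neg hh]
          have h2 : ¬((!false && pvHeads l) = true) := by simp [hh]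
          have := ih false (pre ++ [l]) total
          simp only [List.append_assoc, List.singleton_append, List.length_append,
            List.length_cons, List.length_nil] at this
          rw [show pre.length + 1 = pre.length + (0 + 1) from by omega] at this
          rw [this]
          simp only [pvSecGo, if_neg h1, if_neg h2]
          by_cases he : (pvSecGo ls false).2.isEmpty <;> simp [he, pvSumLens, Nat.add_assoc, Nat.add_comm, Nat.add_left_comm]

theorem pvSumLens_flat : ∀ (c : List (List Char)), pvSumLens c = c.flatten.length := by
  intro c
  induction c with
  | nil => rfl
  | cons l t ih =>
    simp only [pvSumLens, List.map_cons, List.sum_cons, List.flatten_cons,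
      List.length_append] at ih ⊢
    omega

theorem pvFlat2 : ∀ (ss : List (List (List Char))),
    (ss.map List.flatten).flatten = ss.flatten.flatten := by
  intro ss
  induction ss with
  | nil => rfl
  | cons s t ih => simp [ih]

theorem pv_prefix_ext (pat l0 x y : List Char)
    (hpat : pat.all (fun c => !pvIsBreak c) = true)
    (hl0 : ∃ u b, l0 = u ++ [b] ∧ pvIsBreak b = true) :
    List.isPrefixOf pat (l0 ++ x) = List.isPrefixOf pat (l0 ++ y) := by
  obtain ⟨u, b, hu, hb⟩ := hl0
  have key : ∀ (z : List Char), List.isPrefixOf pat (l0 ++ z) = List.isPrefixOf pat l0 := by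
    intro z
    rw [Bool.eq_iff_iff, List.isPrefixOf_iff_prefix, List.isPrefixOf_iff_prefix]
    constructor
    · intro hp
      rcases Nat.le_total pat.length l0.length with hle | hge
      · exact List.prefix_of_prefix_length_le hp (List.prefix_append l0 z) hle
      · exfalso
        have hpre : l0 <+: pat :=
          List.prefix_of_prefix_length_le (List.prefix_append l0 z) hp hge
        have hmem : b ∈ pat := hpre.subset (by rw [hu]; simp)
        have := List.all_eq_true.1 hpat b hmem
        simp [hb] at this
    · intro hp
      exact hp.trans (List.prefix_append l0 z)
  rw [key x, key y]

theorem pvPats_breakless : ∀ p ∈ pvPats, p.all (fun c => !pvIsBreak c) = true := by decide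

theorem pvAllowed_congr (l0 x y : List Char)
    (hl0 : ∃ u b, l0 = u ++ [b] ∧ pvIsBreak b = true) :
    pvPats.any (fun p => List.isPrefixOf p (l0 ++ x))
      = pvPats.any (fun p => List.isPrefixOf p (l0 ++ y)) := by
  simp only [pvPats, List.any_cons, List.any_nil]
  rw [pv_prefix_ext _ l0 x y (pvPats_breakless _ (by simp [pvPats])) hl0,
    pv_prefix_ext _ l0 x y (pvPats_breakless _ (by simp [pvPats])) hl0,
    pv_prefix_ext _ l0 x y (pvPats_breakless _ (by simp [pvPats])) hl0]

theorem pvALoop_nil : pvALoop [] = ([], []) := by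
  rw [pvALoop]
  rw [dif_neg]
  intro h
  exact absurd rfl (pvAllowed_ne [] h)

theorem pvBConsume_nilsec : pvBConsume [[]] = ([], []) := by
  rw [pvBConsume]
  rw [if_neg]
  · simp
  · simp only [List.flatten_nil]
    intro h
    have := pvAllowed_ne []
    rw [pv_find?_isSome_eq_any] at this
    exact absurd rfl (this h)

theorem pvHeads_shape : ∀ (l : List Char), pvHeads l = true → ∃ u, l = '#' :: '#' :: ' ' :: u := by
  intro l h
  rw [pvHeads, List.isPrefixOf_iff_prefix] at h
  obtain ⟨u, hu⟩ := h
  exact ⟨u, hu.symm⟩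

theorem PvLines_head_shape (l0 : List Char) (t : List (List Char)) (h : PvLines (l0 :: t)) :
    t = [] ∨ ∃ u b, l0 = u ++ [b] ∧ pvIsBreak b = true := by
  cases h
  case last => exact Or.inl rfl
  case cons m ch hall hch hrest =>
    right
    rcases hch with hc | hc | ⟨hc, -⟩
    · exact ⟨m, '\n', by rw [hc], by simp [pvIsBreak]⟩
    · exact ⟨m ++ ['\r'], '\n', by rw [hc]; simp, by simp [pvIsBreak]⟩
    · exact ⟨m, '\r', by rw [hc], by simp [pvIsBreak]⟩

theorem pvMain : ∀ (n : Nat) (ls : List (List Char)), ls.flatten.length ≤ n → PvLines ls →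
    pvALoop ls.flatten = pvBConsume (pvSecTop ls) := by
  intro n
  induction n with
  | zero =>
    intro ls hlen hls
    have h0 : ls.flatten = [] := List.length_eq_zero_iff.1 (Nat.le_zero.1 hlen)
    have hnil : ls = [] := by
      cases ls with
      | nil => rfl
      | cons l t =>
        exfalso
        simp at h0
        exact PvLines_mem_ne _ hls l List.mem_cons_self h0.1
    subst hnil
    show pvALoop [] = pvBConsume [[]]
    rw [pvALoop_nil, pvBConsume_nilsec]
  | succ n ih =>
    intro ls hlen hls
    cases ls with
    | nil =>
      show pvALoop [] = pvBConsume [[]]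
      rw [pvALoop_nil, pvBConsume_nilsec]
    | cons l0 t =>
      have hflat : (pvSecGo t false).1 ++ ((pvSecGo t false).2).flatten = t := pvSecGo_flat t false
      have hST : pvSecTop (l0 :: t) = (l0 :: (pvSecGo t false).1) :: (pvSecGo t false).2 := rfl
      -- agreement of the heading test on the full text and on the first section
      have hAllEq : pvPats.any (fun p => List.isPrefixOf p ((l0 :: t).flatten))
          = pvPats.any (fun p => List.isPrefixOf p ((l0 :: (pvSecGo t false).1).flatten)) := by
        rcases PvLines_head_shape l0 t hls with ht0 | hwit
        · subst ht0
          rfl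
        · simp only [List.flatten_cons]
          exact pvAllowed_congr l0 _ _ hwit
      by_cases hA : pvPats.any (fun p => List.isPrefixOf p ((l0 :: t).flatten)) = true
      · -- heading allowed: A peels one section, B consumes the first section
        have hSL : pvSplitLinesK ((l0 :: t).flatten) = l0 :: t := PvLines_reconstruct _ hls
        have hLE : pvLeadingEnd ((l0 :: t).flatten)
            = if ((pvSecGo t false).2).isEmpty then ((l0 :: t).flatten).length
              else l0.length + pvSumLens (pvSecGo t false).1 := by
          rw [pvLeadingEnd.eq_def, hSL]
          have := pvLeadGo_spec t false [l0] ((l0 :: t).flatten).length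
          simpa [pvSumLens] using this
        rw [pvALoop, dif_pos (by rw [pv_find?_isSome_eq_any]; exact hA)]
        rw [hST, pvBConsume, if_pos (by rw [← hAllEq]; exact hA)]
        cases hss : (pvSecGo t false).2 with
        | nil =>
          have hct : (pvSecGo t false).1 = t := by
            have h' := hflat
            rw [hss] at h'
            simpa using h'
          have hLE3 : pvLeadingEnd ((l0 :: t).flatten) = ((l0 :: t).flatten).length := by
            rw [hLE, hss]
            rfl
          simp only [hLE3, List.take_length, List.drop_length,
            show pvLstripRN [] = [] from rfl, pvALoop_nil, hct]
          rfl
        | cons s1 ss2 =>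
          obtain ⟨l1, c1, hs1, hh1⟩ :=
            pvSecGo_heads t false s1 (by rw [hss]; exact List.mem_cons_self)
          have hw : (l0 :: t).flatten = (l0 ++ ((pvSecGo t false).1).flatten)
              ++ ((s1 :: ss2).flatten).flatten := by
            conv_lhs => rw [List.flatten_cons, ← hflat]
            rw [hss]
            simp [List.flatten_append]
          have hLE2 : pvLeadingEnd ((l0 :: t).flatten)
              = (l0 ++ ((pvSecGo t false).1).flatten).length := by
            rw [hLE, hss]
            simp [pvSumLens_flat]
          have htake : ((l0 :: t).flatten).take (pvLeadingEnd ((l0 :: t).flatten))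
              = l0 ++ ((pvSecGo t false).1).flatten := by
            rw [hLE2, hw, List.take_left]
          have hdrop : ((l0 :: t).flatten).drop (pvLeadingEnd ((l0 :: t).flatten))
              = ((s1 :: ss2).flatten).flatten := by
            rw [hLE2, hw, List.drop_left]
          -- the remainder starts with '#', so the lstrip is a no-op
          obtain ⟨u1, hu1⟩ := pvHeads_shape l1 hh1
          have hstrip : pvLstripRN (((s1 :: ss2).flatten).flatten)
              = ((s1 :: ss2).flatten).flatten := by
            have hrem : ((s1 :: ss2).flatten).flatten
                = '#' :: ('#' :: ' ' :: u1 ++ c1.flatten ++ (ss2.flatten).flatten) := by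
              simp [hs1, hu1]
            rw [hrem, pvLstripRN, List.dropWhile_cons]
            simp [pvIsBreak]
          -- induction hypothesis on the remaining sections
          have hPt : PvLines ((s1 :: ss2).flatten) := by
            have ht : PvLines t := PvLines_tail _ _ hls
            rw [← hflat, hss] at ht
            exact PvLines_suffix _ _ ht
          have hl0ne : l0 ≠ [] := PvLines_mem_ne _ hls l0 List.mem_cons_self
          have hlen' : (((s1 :: ss2).flatten).flatten).length ≤ n := by
            have h1 : ((l0 :: t).flatten).length ≤ n + 1 := hlen
            rw [hw] at h1
            have h2 : 1 ≤ l0.length := by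
              cases l0 with
              | nil => exact absurd rfl hl0ne
              | cons a b => simp
            rw [List.length_append, List.length_append] at h1
            omega
          have ihe := ih ((s1 :: ss2).flatten) hlen' hPt
          have hst : pvSecTop ((s1 :: ss2).flatten) = s1 :: ss2 := by
            simp only [hs1, List.flatten_cons, List.cons_append]
            rw [pvSecTop]
            have hsh := pvSecGo_shift t false l1 c1 ss2 (by rw [hss, hs1])
            rw [hsh]
          simp only [htake, hdrop, hstrip, ihe, hst]
          simp
      · -- no allowed heading: both return ("", whole text)
        have hA' : ¬((pvPats.find? (fun p => List.isPrefixOf p ((l0 :: t).flatten))).isSome = true) := by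
          rw [pv_find?_isSome_eq_any]
          exact hA
        rw [pvALoop, dif_neg hA']
        rw [hST, pvBConsume, if_neg (by rw [← hAllEq]; exact hA)]
        refine Prod.ext_iff.mpr ⟨rfl, ?_⟩
        show (l0 :: t).flatten = _
        conv_lhs => rw [List.flatten_cons, ← hflat]
        simp [pvFlat2, List.flatten_append]

-- ===== VERDICT (by name: the statement is the Claim_ definition above) =====
theorem split_leading_model_visible_sections_py_spec : Claim_equal_split_leading_model_visible_sections_py := by
  intro body _
  unfold Spec_split_leading_model_visible_sections_py
  show (String.ofList (List.intercalate ['\n', '\n'] (pvALoop (pvLstripRN body.toList)).1),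
      String.ofList (pvALoop (pvLstripRN body.toList)).2)
    = (String.ofList (List.intercalate ['\n', '\n']
        (pvBConsume (pvBSections (pvSplitLinesK (pvLstripRN body.toList)))).1),
      String.ofList (pvBConsume (pvBSections (pvSplitLinesK (pvLstripRN body.toList)))).2)
  rw [pvBSections_eq_secTop]
  have key : pvALoop (pvLstripRN body.toList)
      = pvBConsume (pvSecTop (pvSplitLinesK (pvLstripRN body.toList))) := by
    conv_lhs => rw [← pvSplitLinesK_flatten (pvLstripRN body.toList)]
    exact pvMain _ _ (Nat.le_refl _) (PvLines_SL _)
  rw [key]
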